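-- pv_equiv track=rewrite | github.com/pypi-data/pypi-mirror-339 | packages/mag-tools/mag_tools-0.3.142-py3-none-any.whl/mag_tools/utils/data/list_utils.py | pick_block
-- ===== SOURCE A (Python) =====
-- from typing import Any, Optional
--
-- def pick_block(lines: list[str], begin_keyword: str, end_keyword: str) -> list[str]:
--     if begin_keyword:
--         start_index: Optional[int] = next((i for i, line in enumerate(lines) if begin_keyword in line.strip()), None)
--     else:
--         start_index: Optional[int] = next((i for i, line in enumerate(lines) if not line.strip()), None)
--
--     if start_index is None:
--         return []
--
--     if end_keyword:
--         end_index: Optional[int] = next((i for i, line in enumerate(lines) if end_keyword in line.strip() and i > start_index), None)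
--     else:
--         end_index: Optional[int] = next((i for i, line in enumerate(lines) if not line.strip() and i > start_index), None)
--     return lines[start_index:end_index+1] if start_index is not None and end_index is not None else []
-- ===== SOURCE B (Python) =====
-- def pick_block(lines: list[str], begin_keyword: str, end_keyword: str) -> list[str]:
--     start_index = end_index = None
--     for i, line in enumerate(lines):
--         s = line.strip()
--         if start_index is None:
--             if (begin_keyword in s) if begin_keyword else (not s):
--                 start_index = i
--         else:
--             if (end_keyword in s) if end_keyword else (not s):
--                 end_index = i
--                 break
--     if start_index is None or end_index is None:
--         return []
--     return lines[start_index:end_index + 1]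
-- ===== Notes on version B (the rewrite author's own statement) =====
-- stated objective: alternative
-- what changed: Replaces A's two separate next()/generator scans over the whole list with one explicit single-pass two-state loop over enumerate(lines) that records the start index and breaks at the first matching end line after it.
import Mathlib
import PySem

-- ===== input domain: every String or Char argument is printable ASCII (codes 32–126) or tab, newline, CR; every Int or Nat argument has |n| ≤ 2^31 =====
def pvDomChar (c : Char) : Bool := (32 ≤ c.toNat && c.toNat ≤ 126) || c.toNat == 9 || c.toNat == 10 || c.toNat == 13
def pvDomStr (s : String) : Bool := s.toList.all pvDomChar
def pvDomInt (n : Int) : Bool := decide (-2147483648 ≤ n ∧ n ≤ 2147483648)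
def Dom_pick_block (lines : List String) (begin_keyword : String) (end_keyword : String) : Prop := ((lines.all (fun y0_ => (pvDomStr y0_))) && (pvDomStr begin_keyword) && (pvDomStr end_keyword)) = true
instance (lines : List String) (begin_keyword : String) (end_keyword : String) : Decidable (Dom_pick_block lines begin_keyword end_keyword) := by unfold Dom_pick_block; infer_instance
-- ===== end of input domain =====

-- B replaces A's two separate generator scans by one single-pass two-state loop; objective: alternative decomposition (same cost).

-- ===== PORT A =====
-- next((i for i, line in enumerate(lines) if p(line)), None)
def pbFind (p : String → Bool) : List String → Nat → Option Nat
  | [], _ => none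
  | l :: ls, i => if p l then some i else pbFind p ls (i + 1)

-- next((i for i, line in enumerate(lines) if q(line) and i > s), None)
def pbFindGt (q : String → Bool) (s : Nat) : List String → Nat → Option Nat
  | [], _ => none
  | l :: ls, i => if q l && decide (i > s) then some i else pbFindGt q s ls (i + 1)

def pick_block (lines : List String) (begin_keyword : String) (end_keyword : String) : List String :=
  match (if begin_keyword ≠ "" then
           pbFind (fun l => PySem.Str.isIn begin_keyword (PySem.Str.strip l)) lines 0
         else
           pbFind (fun l => PySem.Str.strip l == "") lines 0) with
  | none => []
  | some s =>
    match (if end_keyword ≠ "" then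
             pbFindGt (fun l => PySem.Str.isIn end_keyword (PySem.Str.strip l)) s lines 0
           else
             pbFindGt (fun l => PySem.Str.strip l == "") s lines 0) with
    | none => []
    | some t => PySem.List.slice lines (some (s : Int)) (some ((t + 1 : Nat) : Int))

-- ===== PORT B =====
-- the single for-loop of Source B: state = (index i, start_index?); breaks on the first end match
def pbScan (p q : String → Bool) : List String → Nat → Option Nat → Option Nat × Option Nat
  | [], _, st => (st, none)
  | l :: ls, i, st =>
    match st with
    | none => if p l then pbScan p q ls (i + 1) (some i) else pbScan p q ls (i + 1) none
    | some s => if q l then (some s, some i) else pbScan p q ls (i + 1) (some s)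

def pick_block_alt (lines : List String) (begin_keyword : String) (end_keyword : String) : List String :=
  match pbScan
      (fun l => if begin_keyword ≠ "" then PySem.Str.isIn begin_keyword (PySem.Str.strip l)
                else PySem.Str.strip l == "")
      (fun l => if end_keyword ≠ "" then PySem.Str.isIn end_keyword (PySem.Str.strip l)
                else PySem.Str.strip l == "")
      lines 0 none with
  | (some s, some t) => PySem.List.slice lines (some (s : Int)) (some ((t + 1 : Nat) : Int))
  | _ => []

-- ===== PRECONDITION & SPEC =====
def Spec_pick_block (lines : List String) (begin_keyword : String) (end_keyword : String) (out : List String) : Prop := out = pick_block_alt lines begin_keyword end_keyword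
instance (lines : List String) (begin_keyword : String) (end_keyword : String) (out : List String) : Decidable (Spec_pick_block lines begin_keyword end_keyword out) := by unfold Spec_pick_block; infer_instance

-- ===== CLAIM (what is proved, stated in full; the proofs are below) =====
def Claim_equal_pick_block : Prop := ∀ (lines : List String) (begin_keyword : String) (end_keyword : String), Dom_pick_block lines begin_keyword end_keyword → Spec_pick_block lines begin_keyword end_keyword (pick_block lines begin_keyword end_keyword)

-- ===== LEMMAS AND PROOFS =====

theorem pbFind_le {p : String → Bool} : ∀ (ls : List String) (i s : Nat),
    pbFind p ls i = some s → i ≤ s := by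
  intro ls
  induction ls with
  | nil => intro i s h; simp [pbFind] at h
  | cons l ls ih =>
    intro i s h
    unfold pbFind at h
    split at h
    · cases h; exact le_rfl
    · exact le_trans (Nat.le_succ i) (ih (i + 1) s h)

theorem pbScan_some {p q : String → Bool} : ∀ (ls : List String) (j s : Nat), s < j →
    pbScan p q ls j (some s) = (some s, pbFindGt q s ls j) := by
  intro ls
  induction ls with
  | nil => intro j s _; simp [pbScan, pbFindGt]
  | cons l ls ih =>
    intro j s hs
    unfold pbScan pbFindGt
    by_cases hq : q l = true
    · simp [hq, hs]
    · simp only [Bool.not_eq_true] at hq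
      simp [hq]
      exact ih (j + 1) s (Nat.lt_succ_of_lt hs)

theorem pbScan_none {p q : String → Bool} : ∀ (ls : List String) (i : Nat),
    pbScan p q ls i none =
      (pbFind p ls i, (pbFind p ls i).bind (fun s => pbFindGt q s ls i)) := by
  intro ls
  induction ls with
  | nil => intro i; simp [pbScan, pbFind]
  | cons l ls ih =>
    intro i
    unfold pbScan pbFind
    by_cases hp : p l = true
    · rw [if_pos hp, if_pos hp, pbScan_some ls (i + 1) i (Nat.lt_succ_self i)]
      simp [pbFindGt]
    · simp only [Bool.not_eq_true] at hp
      rw [if_neg (by simp [hp]), if_neg (by simp [hp]), ih (i + 1)]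
      cases hfind : pbFind p ls (i + 1) with
      | none => simp
      | some s =>
        have hle : i + 1 ≤ s := pbFind_le ls (i + 1) s hfind
        simp only [Option.bind_some]
        rw [show pbFindGt q s (l :: ls) i
              = if (q l && decide (i > s)) = true then some i else pbFindGt q s ls (i + 1) from rfl,
           if_neg (by simp; omega)]

-- ===== VERDICT (by name: the statement is the Claim_ definition above) =====
theorem pick_block_spec : Claim_equal_pick_block := by
  intro lines b e _
  unfold Spec_pick_block pick_block pick_block_alt
  rw [pbScan_none]
  by_cases hb : b ≠ "" <;> by_cases he : e ≠ "" <;>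
    simp only [hb, he, if_pos, if_neg, ne_eq, not_false_iff] <;>
  · cases hs : pbFind _ lines 0 with
    | none => simp
    | some s =>
      simp only [Option.bind_some]
      cases ht : pbFindGt _ s lines 0 <;> simp
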